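-- pv_equiv track=rewrite | github.com/billwallis/mini-projects | src/character_encoding/_sum_floats.py | get_bin_array_0_2
-- ===== SOURCE A (Python) =====
-- def get_bin_array_0_2(bin_len: int) -> list[int]:
--     bin_list = []
--     for i in range(bin_len + 1):
--         if i % 4 in [2, 3]:
--             bin_list.append(1)
--         else:
--             bin_list.append(0)
--
--     return bin_list
-- ===== SOURCE B (Python) =====
-- def get_bin_array_0_2(bin_len: int) -> list[int]:
--     # Tile the fixed 4-element pattern and truncate, instead of a per-index loop.
--     n = max(bin_len + 1, 0)
--     return ([0, 0, 1, 1] * (n // 4 + 1))[:n]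
-- ===== Notes on version B (the rewrite author's own statement) =====
-- stated objective: faster
-- what changed: Replaces the per-index loop with its modulo test and branch by tiling the fixed four-element pattern enough times and truncating with a slice, so the work is bulk list repetition instead of per-element Python bytecode.
import Mathlib
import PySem

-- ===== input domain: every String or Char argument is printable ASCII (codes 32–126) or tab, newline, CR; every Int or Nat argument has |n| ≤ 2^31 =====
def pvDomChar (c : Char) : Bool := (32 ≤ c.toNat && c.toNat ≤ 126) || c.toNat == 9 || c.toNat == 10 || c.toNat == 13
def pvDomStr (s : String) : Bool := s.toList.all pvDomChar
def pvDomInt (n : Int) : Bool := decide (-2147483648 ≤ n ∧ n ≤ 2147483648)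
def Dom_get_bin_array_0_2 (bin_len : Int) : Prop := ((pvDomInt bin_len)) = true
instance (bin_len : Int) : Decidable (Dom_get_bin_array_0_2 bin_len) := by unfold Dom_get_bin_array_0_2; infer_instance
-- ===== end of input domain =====

-- B tiles the fixed pattern [0,0,1,1] and truncates with a slice instead of looping with a modulo test (objective: simpler).

-- ===== PORT A =====
def get_bin_array_0_2 (bin_len : Int) : List Int :=
  (PySem.List.pyRange 0 (bin_len + 1) 1).foldl
    (fun acc i =>
      if PySem.Int.mod i 4 == 2 || PySem.Int.mod i 4 == 3 then acc ++ [(1 : Int)]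
      else acc ++ [(0 : Int)])
    []

-- ===== PORT B =====
-- '[0,0,1,1] * k' (k ≥ 0) is List.flatten (List.replicate k …); '[:n]' (n ≥ 0) is PySem.List.slice
def get_bin_array_0_2_alt (bin_len : Int) : List Int :=
  PySem.List.slice
    (List.flatten (List.replicate
      (PySem.Int.floordiv (max (bin_len + 1) 0) 4 + 1).toNat [(0 : Int), 0, 1, 1]))
    none (some (max (bin_len + 1) 0))

-- ===== PRECONDITION & SPEC =====
def Spec_get_bin_array_0_2 (bin_len : Int) (out : List Int) : Prop := out = get_bin_array_0_2_alt bin_len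
instance (bin_len : Int) (out : List Int) : Decidable (Spec_get_bin_array_0_2 bin_len out) := by unfold Spec_get_bin_array_0_2; infer_instance

-- ===== CLAIM (what is proved, stated in full; the proofs are below) =====
def Claim_equal_get_bin_array_0_2 : Prop := ∀ (bin_len : Int), Dom_get_bin_array_0_2 bin_len → Spec_get_bin_array_0_2 bin_len (get_bin_array_0_2 bin_len)

-- ===== LEMMAS AND PROOFS =====

-- the value A's loop appends at index i
def pvBit (i : Int) : Int :=
  if PySem.Int.mod i 4 == 2 || PySem.Int.mod i 4 == 3 then 1 else 0

-- the same value, phrased over Nat indices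
def pvBitN (k : Nat) : Int :=
  if k % 4 = 2 ∨ k % 4 = 3 then 1 else 0

theorem pvBit_coe (k : Nat) : pvBit ((0 : Int) + (k : Int)) = pvBitN k := by
  have h : (((k : Int) % 4 = 2 ∨ (k : Int) % 4 = 3)) ↔ (k % 4 = 2 ∨ k % 4 = 3) := by omega
  simp [pvBit, pvBitN, h]

theorem pvBitN_period (k r : Nat) : pvBitN (4 * k + r) = pvBitN r := by
  simp [pvBitN]

-- the tiled list is exactly the per-index map over range (4*k)
theorem tile_eq_map (k : Nat) :
    List.flatten (List.replicate k [(0 : Int), 0, 1, 1]) =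
      (List.range (4 * k)).map pvBitN := by
  induction k with
  | zero => simp
  | succ k ih =>
    rw [List.replicate_succ', List.flatten_append, ih,
        show 4 * (k + 1) = 4 * k + 4 from by ring,
        List.range_add, List.map_append, List.map_map]
    congr 1
    have : ∀ r, (pvBitN ∘ fun x => 4 * k + x) r = pvBitN r := fun r => pvBitN_period k r
    rw [List.map_congr_left (fun r _ => this r)]
    decide

theorem get_bin_array_0_2_spec : Claim_equal_get_bin_array_0_2 := by
  intro bin_len _
  unfold Spec_get_bin_array_0_2 get_bin_array_0_2 get_bin_array_0_2_alt
  set m : Nat := (bin_len + 1).toNat with hm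
  -- left side: the loop is a map of pvBit over the range
  have hfun : (fun (acc : List Int) (i : Int) =>
      if PySem.Int.mod i 4 == 2 || PySem.Int.mod i 4 == 3 then acc ++ [(1 : Int)]
      else acc ++ [(0 : Int)]) = fun acc i => acc ++ [pvBit i] := by
    funext acc i
    unfold pvBit
    split <;> rfl
  rw [hfun, PySem.List.foldl_append_singleton_eq_map, PySem.List.pyRange_one]
  simp only [Int.sub_zero, List.nil_append, List.map_map, ← hm]
  rw [show (pvBit ∘ fun k : Nat => (0 : Int) + (k : Int)) = pvBitN from
        funext fun k => pvBit_coe k]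
  -- right side
  have hn : max (bin_len + 1) 0 = (m : Int) := by omega
  rw [hn]
  rw [show PySem.Int.floordiv (m : Int) 4 = ((m / 4 : Nat) : Int) from
        PySem.Int.floordiv_natCast m 4,
      show (((m / 4 : Nat) : Int) + 1).toNat = m / 4 + 1 from by omega,
      PySem.List.slice_to_natCast,
      tile_eq_map (m / 4 + 1), ← List.map_take, List.take_range,
      show min m (4 * (m / 4 + 1)) = m from by omega]
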